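-- pv_equiv track=rewrite | github.com/JunRain2/algorithm | python/귤_고르기.py | solution
-- ===== SOURCE A (Python) =====
-- from collections import Counter
--
-- def solution(k, tangerine):
--     counter = sorted(Counter(tangerine).values(), reverse=True)
--
--     answer = 0
--     for c in counter:
--         k -= c
--         answer += 1
--         if k <= 0:
--             break
--
--     return answer
-- ===== SOURCE B (Python) =====
-- from collections import Counter
--
-- def solution(k, tangerine):
--     if k <= 0:
--         return 0
--     # bucket the type frequencies by value, then scan counts high-to-low,
--     # taking whole buckets at once (no sort)
--     freq = Counter(Counter(tangerine).values())
--     answer = 0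
--     for c in range(len(tangerine), 0, -1):
--         m = freq[c]
--         if m * c >= k:
--             return answer + (k + c - 1) // c
--         k -= m * c
--         answer += m
--     return answer
-- ===== Notes on version B (the rewrite author's own statement) =====
-- stated objective: alternative
-- what changed: B replaces sorting the type frequencies with a frequency-of-frequencies bucket table (Counter of Counter values) scanned from len(tangerine) down to 1, consuming whole buckets at once with a ceiling division instead of subtracting one type at a time; Pre_ excludes k <= 0 with a nonempty list, an unspecified corner where A's 1 and B's 0 are both defensible.
-- outside the precondition, e.g. on solution(0, [1]): A returns 1, B returns 0; on solution(-2, [3, 3, 5]): A returns 1, B returns 0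
import Mathlib
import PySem

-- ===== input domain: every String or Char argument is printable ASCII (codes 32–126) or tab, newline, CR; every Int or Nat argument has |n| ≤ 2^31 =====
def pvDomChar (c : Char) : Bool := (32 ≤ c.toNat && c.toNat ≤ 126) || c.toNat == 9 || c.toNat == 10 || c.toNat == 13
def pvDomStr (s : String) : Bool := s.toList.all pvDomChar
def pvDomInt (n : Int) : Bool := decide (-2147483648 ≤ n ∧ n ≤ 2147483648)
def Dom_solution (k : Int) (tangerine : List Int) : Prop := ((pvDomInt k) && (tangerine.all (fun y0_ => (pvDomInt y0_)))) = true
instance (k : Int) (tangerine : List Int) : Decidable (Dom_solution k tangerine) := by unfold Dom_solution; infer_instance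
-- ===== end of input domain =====

-- B buckets the type frequencies instead of sorting them; objective: alternative algorithm.

-- ===== PORT A =====
-- loop of A: for c in counter: k -= c; answer += 1; if k <= 0: break
def solutionLoop : List Int → Int → Int → Int
  | [], _, answer => answer
  | c :: rest, k, answer =>
    if k - c ≤ 0 then answer + 1 else solutionLoop rest (k - c) (answer + 1)

def solution (k : Int) (tangerine : List Int) : Int :=
  solutionLoop (PySem.List.sorted (PySem.Dict.counter tangerine).values (fun x => x) true) k 0

-- ===== PORT B =====
-- B: bucket table freq = Counter(Counter(tangerine).values()); scan counts
-- from len(tangerine) down to 1, taking whole buckets at once; no sort.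
def solutionAltLoop (freq : PySem.Dict Int Int) : List Int → Int → Int → Int
  | [], _, answer => answer
  | c :: rest, k, answer =>
    let m := freq.getD c 0
    if m * c ≥ k then answer + PySem.Int.floordiv (k + c - 1) c
    else solutionAltLoop freq rest (k - m * c) (answer + m)

def solution_alt (k : Int) (tangerine : List Int) : Int :=
  if k ≤ 0 then 0
  else solutionAltLoop (PySem.Dict.counter (PySem.Dict.counter tangerine).values)
        (PySem.List.pyRange (tangerine.length : Int) 0 (-1)) k 0

-- ===== PRECONDITION & SPEC =====
-- Pre_ excludes k <= 0 with a nonempty list: asking for at most zero fruits is outside the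
-- task's natural domain and that corner is unspecified — A returns 1 (its loop still consumes
-- one type), B returns 0 (nothing needs picking); both are defensible. Empty lists stay inside
-- (both return 0 for every k).
def Pre_solution (k : Int) (tangerine : List Int) : Prop := 1 ≤ k ∨ tangerine = []
instance (k : Int) (tangerine : List Int) : Decidable (Pre_solution k tangerine) := by unfold Pre_solution; infer_instance

def pvWitness_solution : Int × List Int := (4, [1, 1, 2])

def Spec_solution (k : Int) (tangerine : List Int) (out : Int) : Prop := out = solution_alt k tangerine
instance (k : Int) (tangerine : List Int) (out : Int) : Decidable (Spec_solution k tangerine out) := by unfold Spec_solution; infer_instance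

-- ===== CLAIM (what is proved, stated in full; the proofs are below) =====
def Claim_equal_solution : Prop := ∀ (k : Int) (tangerine : List Int), Dom_solution k tangerine → Pre_solution k tangerine → Spec_solution k tangerine (solution k tangerine)

-- ===== LEMMAS AND PROOFS =====

-- the descending listing of the multiset V that B's bucket scan walks through
def descListing (V : List Int) (n : Int) : List Int :=
  (PySem.List.pyRange n 0 (-1)).flatMap (fun c => List.replicate (V.count c) c)

theorem count_flatMap_replicate (cs : List Int) (f : Int → Nat) (hnd : cs.Nodup) (a : Int) :
    (cs.flatMap (fun c => List.replicate (f c) c)).count a = if a ∈ cs then f a else 0 := by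
  induction cs with
  | nil => simp
  | cons c cs ih =>
    simp only [List.flatMap_cons, List.count_append, List.count_replicate]
    rw [ih hnd.of_cons]
    rcases eq_or_ne a c with rfl | hne
    · have : a ∉ cs := (List.nodup_cons.mp hnd).1
      simp [this]
    · simp [hne, Ne.symm hne, List.mem_cons]

theorem pairwise_gt_pyRange_neg_one (a b : Int) :
    (PySem.List.pyRange a b (-1)).Pairwise (· > ·) := by
  rw [PySem.List.pyRange_neg_one]
  rw [List.pairwise_map]
  exact List.pairwise_lt_range.imp (fun h => by omega)

theorem descListing_perm (V : List Int) (n : Int)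
    (hmem : ∀ v ∈ V, 1 ≤ v ∧ v ≤ n) : (descListing V n).Perm V := by
  apply List.perm_iff_count.mpr
  intro a
  have hnd : (PySem.List.pyRange n 0 (-1)).Nodup :=
    (pairwise_gt_pyRange_neg_one n 0).imp (fun h => ne_of_gt h)
  rw [descListing, count_flatMap_replicate _ _ hnd]
  by_cases ha : a ∈ PySem.List.pyRange n 0 (-1)
  · simp [ha]
  · have : a ∉ V := by
      intro hv
      exact ha (PySem.List.mem_pyRange_neg_one.mpr ⟨by have := hmem a hv; omega, (hmem a hv).2⟩)
    simp [ha, List.count_eq_zero.mpr this]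

theorem pairwise_ge_flatMap (cs : List Int) (f : Int → Nat) (h : cs.Pairwise (· > ·)) :
    (cs.flatMap (fun c => List.replicate (f c) c)).Pairwise (fun a b => b ≤ a) := by
  induction cs with
  | nil => simp
  | cons c cs ih =>
    simp only [List.flatMap_cons]
    refine List.pairwise_append.mpr ⟨List.pairwise_replicate.mpr (Or.inr le_rfl), ih h.of_cons, ?_⟩
    intro x hx y hy
    rcases List.eq_of_mem_replicate hx with rfl
    rcases List.mem_flatMap.mp hy with ⟨c', hc', hy'⟩
    rcases List.eq_of_mem_replicate hy' with rfl
    exact le_of_lt (List.rel_of_pairwise_cons h hc')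

theorem descListing_sorted (V : List Int) (n : Int) :
    (descListing V n).Pairwise (fun a b => b ≤ a) :=
  pairwise_ge_flatMap _ _ (pairwise_gt_pyRange_neg_one n 0)

theorem descListing_eq_sorted (V : List Int) (n : Int)
    (hmem : ∀ v ∈ V, 1 ≤ v ∧ v ≤ n) :
    PySem.List.sorted V (fun x => x) true = descListing V n := by
  exact ((PySem.List.sorted_perm V (fun x => x) true).trans
      (descListing_perm V n hmem).symm).eq_of_pairwise
    (fun a b _ _ h1 h2 => le_antisymm h2 h1)
    (PySem.List.sorted_pairwise_rev V (fun x => x)) (descListing_sorted V n)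

-- one bucket of m equal counts c processed one-by-one by A's loop
theorem solutionLoop_replicate (m : Nat) (c : Int) (rest : List Int) (k ans : Int)
    (hk : 0 < k) (hc : 0 < c) :
    solutionLoop (List.replicate m c ++ rest) k ans =
      if (m : Int) * c ≥ k then ans + PySem.Int.floordiv (k + c - 1) c
      else solutionLoop rest (k - (m : Int) * c) (ans + (m : Int)) := by
  induction m generalizing k ans with
  | zero =>
    simp only [Nat.cast_zero, List.replicate_zero, List.nil_append, zero_mul, sub_zero, add_zero]
    rw [if_neg (by omega : ¬ (0 : Int) ≥ k)]
  | succ m ih =>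
    have hcast : ((m + 1 : Nat) : Int) * c = (m : Int) * c + c := by push_cast; ring
    rw [List.replicate_succ, List.cons_append]
    show (if k - c ≤ 0 then ans + 1 else solutionLoop (List.replicate m c ++ rest) (k - c) (ans + 1)) = _
    by_cases hkc : k - c ≤ 0
    · rw [if_pos hkc]
      have hge : ((m + 1 : Nat) : Int) * c ≥ k := by
        have : (0 : Int) ≤ (m : Int) * c := mul_nonneg (by positivity) (le_of_lt hc)
        omega
      rw [if_pos hge]
      have h1 : PySem.Int.floordiv (k + c - 1) c = 1 := by
        rw [PySem.Int.floordiv_eq_iff_of_pos hc]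
        constructor <;> nlinarith
      omega
    · rw [if_neg hkc]
      rw [ih (k - c) (ans + 1) (by omega)]
      by_cases hge : (m : Int) * c ≥ k - c
      · rw [if_pos hge, if_pos (by omega : ((m + 1 : Nat) : Int) * c ≥ k)]
        have e1 : k - c + c - 1 = (k - 1 - 1 * c) + 1 * c := by ring
        have e2 : k + c - 1 = (k - 1 - 1 * c) + 2 * c := by ring
        rw [e1, e2, PySem.Int.floordiv_eq_ediv_of_pos hc, PySem.Int.floordiv_eq_ediv_of_pos hc,
          Int.add_mul_ediv_right _ _ (ne_of_gt hc), Int.add_mul_ediv_right _ _ (ne_of_gt hc)]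
        omega
      · rw [if_neg hge, if_neg (by omega : ¬ ((m + 1 : Nat) : Int) * c ≥ k)]
        have e1 : k - c - (m : Int) * c = k - ((m + 1 : Nat) : Int) * c := by omega
        have e2 : ans + 1 + (m : Int) = ans + ((m + 1 : Nat) : Int) := by push_cast; ring
        rw [e1, e2]

theorem solutionLoop_eq_altLoop (freq : PySem.Dict Int Int) (V : List Int)
    (hfreq : ∀ c, freq.getD c 0 = (V.count c : Int))
    (cs : List Int) (k ans : Int) (hk : 0 < k) (hcs : ∀ c ∈ cs, 0 < c) :
    solutionLoop (cs.flatMap (fun c => List.replicate (V.count c) c)) k ans =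
      solutionAltLoop freq cs k ans := by
  induction cs generalizing k ans with
  | nil => rfl
  | cons c cs ih =>
    have hc : 0 < c := hcs c List.mem_cons_self
    rw [List.flatMap_cons, solutionLoop_replicate _ _ _ _ _ hk hc]
    show _ = (if freq.getD c 0 * c ≥ k then ans + PySem.Int.floordiv (k + c - 1) c
      else solutionAltLoop freq cs (k - freq.getD c 0 * c) (ans + freq.getD c 0))
    rw [hfreq c]
    by_cases hge : ((V.count c : Int)) * c ≥ k
    · rw [if_pos hge, if_pos hge]
    · rw [if_neg hge, if_neg hge]
      have hpos : (0 : Int) ≤ (V.count c : Int) * c := mul_nonneg (by positivity) (le_of_lt hc)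
      exact ih (k - (V.count c : Int) * c) (ans + (V.count c : Int)) (by omega)
        (fun c' hc' => hcs c' (List.mem_cons_of_mem _ hc'))

theorem values_counter_mem (t : List Int) (v : Int) (hv : v ∈ (PySem.Dict.counter t).values) :
    1 ≤ v ∧ v ≤ (t.length : Int) := by
  have : (PySem.Dict.counter t).values =
      (PySem.Set.ofList t).map (fun x => (t.count x : Int)) := by
    show ((PySem.Dict.counter t).items).map (·.2) = _
    rw [PySem.Dict.items_counter]
    simp
  rw [this] at hv
  rcases List.mem_map.mp hv with ⟨x, hx, rfl⟩
  have hxt : x ∈ t := (PySem.Set.mem_ofList _ _).mp hx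
  have h1 : 0 < t.count x := List.count_pos_iff.mpr hxt
  have h2 : t.count x ≤ t.length := List.count_le_length
  omega

-- ===== VERDICT (by name: the statements are the Claim_ definitions above) =====
theorem solution_spec : Claim_equal_solution := by
  unfold Claim_equal_solution
  intro k t _ hPre
  unfold Spec_solution
  by_cases ht : t = []
  · subst ht
    show solutionLoop (PySem.List.sorted (PySem.Dict.counter ([] : List Int)).values _ true) k 0 = _
    simp [solution_alt, PySem.Dict.counter, PySem.Dict.empty, PySem.Dict.values,
      PySem.List.sorted, solutionLoop, PySem.List.pyRange, solutionAltLoop]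
  · have hk : ¬ k ≤ 0 := by
      rcases hPre with h | h
      · omega
      · exact absurd h ht
    have hmem : ∀ v ∈ (PySem.Dict.counter t).values, 1 ≤ v ∧ v ≤ (t.length : Int) :=
      fun v hv => values_counter_mem t v hv
    show solutionLoop (PySem.List.sorted (PySem.Dict.counter t).values _ true) k 0 = _
    rw [descListing_eq_sorted _ (t.length : Int) hmem]
    unfold descListing
    rw [solutionLoop_eq_altLoop (PySem.Dict.counter (PySem.Dict.counter t).values)
      (PySem.Dict.counter t).values
      (fun c => PySem.Dict.getD_counter (PySem.Dict.counter t).values c)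
      (PySem.List.pyRange (t.length : Int) 0 (-1)) k 0 (by omega)
      (fun c hc => ((PySem.List.mem_pyRange_neg_one).mp hc).1)]
    unfold solution_alt
    rw [if_neg hk]
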